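-- pv_equiv track=rewrite | github.com/oigomezz/Retos | Hackerearth/Algorithms/Graphs/Depth-First-Search/Temporary-Tree/solution.py | tbt_helper
-- ===== SOURCE A (Python) =====
-- def dfs(graph, index, visited, subtree, size, all_accepted_edges):
--     visited[index] = True
--     size[0] += 1
--     subtree[index] += 1
--     for edge in graph[index]:
--         node, weight = edge
--         if not visited[node]:
--             dfs(graph, node, visited, subtree,
--                 size, all_accepted_edges)
--             all_accepted_edges.append((weight, subtree[node]))
--             subtree[index] += subtree[node]
--
-- def tbt_helper(start, graph, visited, subtree, mod):
--     size = [0]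
--     ans = 0
--     all_accepted_edges = []
--     dfs(graph, start, visited, subtree,
--         size, all_accepted_edges)
--     for edge in all_accepted_edges:
--         weight, curr_subtree_value = edge
--         ans += weight * curr_subtree_value * (size[0] - curr_subtree_value)
--         ans %= mod
--     return ans
-- ===== SOURCE B (Python) =====
-- def tbt_helper(start, graph, visited, subtree, mod):
--     # Iterative DFS with an explicit stack of edge/post work items; instead of
--     # collecting the accepted edges in a list and looping over them, maintain
--     # two running sums S1 = sum(w*s) and S2 = sum(w*s*s) and use
--     # sum(w*s*(size-s)) = size*S1 - S2, taking the modulus once at the end.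
--     visited[start] = True
--     subtree[start] += 1
--     size = 1
--     sum1 = 0
--     sum2 = 0
--     stack = [('e', start, c, w) for (c, w) in reversed(graph[start])]
--     while stack:
--         tag, p, c, w = stack.pop()
--         if tag == 'p':
--             s = subtree[c]
--             subtree[p] += s
--             sum1 += w * s
--             sum2 += w * s * s
--         elif not visited[c]:
--             visited[c] = True
--             subtree[c] += 1
--             size += 1
--             stack.append(('p', p, c, w))
--             stack.extend(('e', c, c2, w2) for (c2, w2) in reversed(graph[c]))
--     return (size * sum1 - sum2) % mod
-- ===== Notes on version B (the rewrite author's own statement) =====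
-- stated objective: alternative
-- what changed: Replaces A's recursive DFS that collects an accepted-edge list and then re-mods the answer per edge with an iterative explicit-stack DFS (edge/post work items) that keeps two running sums S1=sum(w*s), S2=sum(w*s^2) and returns (size*S1 - S2) % mod with a single final modulus.
-- outside the precondition, e.g. on tbt_helper(0, [[], [(5, 1)]], [False, False], [0, 0], 7): A returns 0, B returns 0; on tbt_helper(0, [[], [(2, 1)]], [False, False, False], [0, 0, 0], 7): A returns 0, B returns 0; on tbt_helper(0, [[]], [False], [0], 0): A returns 0, B raises ZeroDivisionError
import Mathlib
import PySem

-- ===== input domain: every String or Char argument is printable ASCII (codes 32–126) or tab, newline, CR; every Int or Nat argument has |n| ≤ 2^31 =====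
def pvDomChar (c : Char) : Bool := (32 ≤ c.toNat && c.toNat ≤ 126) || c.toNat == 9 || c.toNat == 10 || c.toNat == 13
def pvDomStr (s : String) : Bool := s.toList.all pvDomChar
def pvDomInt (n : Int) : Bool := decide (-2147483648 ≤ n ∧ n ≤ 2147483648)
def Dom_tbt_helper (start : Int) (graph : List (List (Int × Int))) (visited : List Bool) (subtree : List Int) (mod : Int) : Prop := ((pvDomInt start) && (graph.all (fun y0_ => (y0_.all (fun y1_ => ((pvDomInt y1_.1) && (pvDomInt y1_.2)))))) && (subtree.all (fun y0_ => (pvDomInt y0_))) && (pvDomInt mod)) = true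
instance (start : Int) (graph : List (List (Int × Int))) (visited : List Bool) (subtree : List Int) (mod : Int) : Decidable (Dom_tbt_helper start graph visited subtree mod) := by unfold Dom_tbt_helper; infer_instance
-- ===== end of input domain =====

-- B replaces A's recursive DFS + collected edge list + per-edge re-modding loop by an
-- iterative explicit-stack DFS maintaining two running sums and one final modulus
-- (size*Σw·s − Σw·s² = Σw·s·(size−s)); equivalence is about the RETURN value only
-- (both Pythons mutate `visited`/`subtree` identically, as tested, but that is not modelled here).

-- ===== PORT A =====
-- state: (visited, subtree, size[0], all_accepted_edges); `fuel` is only a totality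
-- guard (first Nat argument), large enough under Pre_ since every recursive call
-- marks a previously unvisited node; pyGetD/pySetD defaults are only reached where
-- the Python raises IndexError (outside Pre_).
def dfsA (g : List (List (Int × Int))) : Nat → Int →
    (List Bool × List Int × Int × List (Int × Int)) →
    (List Bool × List Int × Int × List (Int × Int))
  | 0, _, st => st
  | fuel+1, index, (v, s, sz, es) =>
      (PySem.List.pyGetD g index []).foldl
        (fun st e =>
          if PySem.List.pyGetD st.1 e.1 true then st
          else
            let r := dfsA g fuel e.1 st
            let t := PySem.List.pyGetD r.2.1 e.1 0
            (r.1, PySem.List.pySetD r.2.1 index (PySem.List.pyGetD r.2.1 index 0 + t),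
             r.2.2.1, r.2.2.2 ++ [(e.2, t)]))
        (PySem.List.pySetD v index true,
         PySem.List.pySetD s index (PySem.List.pyGetD s index 0 + 1),
         sz + 1, es)

def tbt_helper (start : Int) (graph : List (List (Int × Int))) (visited : List Bool) (subtree : List Int) (mod : Int) : Int :=
  let r := dfsA graph (visited.count false + 1) start (visited, subtree, 0, [])
  r.2.2.2.foldl (fun ans e => PySem.Int.mod (ans + e.1 * e.2 * (r.2.2.1 - e.2)) mod) 0

-- ===== PORT B =====
-- termination helpers for the stack machine (cited in decreasing_by)
theorem pv_cnt_set_lt : ∀ (v : List Bool) (k : Nat), v[k]? = some false →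
    (v.set k true).count false < v.count false := by
  intro v
  induction v with
  | nil => intro k h; simp at h
  | cons b t ih =>
    intro k h
    cases k with
    | zero => simp_all
    | succ k =>
      simp only [List.getElem?_cons_succ] at h
      have := ih k h
      simpa [List.count_cons] using this

theorem pv_count_set_lt (v : List Bool) (i : Int) (h : PySem.List.pyGet? v i = some false) :
    (PySem.List.pySetD v i true).count false < v.count false := by
  unfold PySem.List.pyGet? PySem.List.pySetD PySem.List.pySet? at *
  cases hk : PySem.List.pyIdx? v.length i with
  | none => rw [hk] at h; simp at h
  | some k =>
    rw [hk] at h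
    simp only [Option.bind] at h
    simp only [hk, Option.map_some, Option.getD_some]
    exact pv_cnt_set_lt v k h

-- work items of Source B's stack: ('e', p, c, w) and ('p', p, c, w)
inductive PVItem where
  | edge (p c w : Int)
  | post (p c w : Int)
deriving Repr, DecidableEq

-- Source B pushes the reversed adjacency list and pops from the end; the stack is the
-- List with head = top, so the items appear in adjacency order.
def pvEdgeItems (p : Int) (adj : List (Int × Int)) : List PVItem :=
  adj.map (fun e => PVItem.edge p e.1 e.2)

-- state: (visited, subtree, size, sum1, sum2); the `none` branch is where Source B
-- raises IndexError (outside Pre_).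
def runB (g : List (List (Int × Int))) :
    (List Bool × List Int × Int × Int × Int) → List PVItem →
    (List Bool × List Int × Int × Int × Int)
  | st, [] => st
  | st, PVItem.post p c w :: rest =>
      let t := PySem.List.pyGetD st.2.1 c 0
      runB g (st.1, PySem.List.pySetD st.2.1 p (PySem.List.pyGetD st.2.1 p 0 + t),
              st.2.2.1, st.2.2.2.1 + w * t, st.2.2.2.2 + w * t * t) rest
  | st, PVItem.edge p c w :: rest =>
      match h : PySem.List.pyGet? st.1 c with
      | none => st
      | some true => runB g st rest
      | some false =>
          runB g (PySem.List.pySetD st.1 c true,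
                  PySem.List.pySetD st.2.1 c (PySem.List.pyGetD st.2.1 c 0 + 1),
                  st.2.2.1 + 1, st.2.2.2.1, st.2.2.2.2)
               (pvEdgeItems c (PySem.List.pyGetD g c []) ++ PVItem.post p c w :: rest)
termination_by st stack => (st.1.count false, stack.length)
decreasing_by
  · exact Prod.Lex.right _ (by simp)
  · exact Prod.Lex.right _ (by simp)
  · exact Prod.Lex.left _ _ (pv_count_set_lt _ _ h)

def tbt_helper_alt (start : Int) (graph : List (List (Int × Int))) (visited : List Bool) (subtree : List Int) (mod : Int) : Int :=
  let v := PySem.List.pySetD visited start true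
  let s := PySem.List.pySetD subtree start (PySem.List.pyGetD subtree start 0 + 1)
  let r := runB graph (v, s, 1, 0, 0) (pvEdgeItems start (PySem.List.pyGetD graph start []))
  PySem.Int.mod (r.2.2.1 * r.2.2.2.1 - r.2.2.2.2) mod

-- ===== PRECONDITION & SPEC =====
-- Pre_ excludes mod = 0 and out-of-range indexing, where the Python generally
-- raises ZeroDivisionError / IndexError: start must index all three lists, every
-- edge target must index `visited`, and an initially-unvisited edge target must
-- also index `graph` and `subtree`.  This also drops some inputs A returns on
-- (a malformed edge whose source is never reached, or mod = 0 when no edge is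
-- accepted).
def Pre_tbt_helper (start : Int) (graph : List (List (Int × Int))) (visited : List Bool) (subtree : List Int) (mod : Int) : Prop :=
  mod ≠ 0 ∧
  (-(min (min graph.length visited.length) subtree.length : Int) ≤ start ∧
    start < (min (min graph.length visited.length) subtree.length : Int)) ∧
  (∀ adj ∈ graph, ∀ e ∈ adj, -(visited.length : Int) ≤ e.1 ∧ e.1 < (visited.length : Int)) ∧
  (∀ adj ∈ graph, ∀ e ∈ adj, PySem.List.pyGetD visited e.1 true = false →
    -(min graph.length subtree.length : Int) ≤ e.1 ∧ e.1 < (min graph.length subtree.length : Int))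
instance (start : Int) (graph : List (List (Int × Int))) (visited : List Bool) (subtree : List Int) (mod : Int) : Decidable (Pre_tbt_helper start graph visited subtree mod) := by unfold Pre_tbt_helper; infer_instance

def pvWitness_tbt_helper : Int × (List (List (Int × Int))) × List Bool × List Int × Int :=
  (0, [[(1, 2)], []], [false, false], [0, 0], 7)

def Spec_tbt_helper (start : Int) (graph : List (List (Int × Int))) (visited : List Bool) (subtree : List Int) (mod : Int) (out : Int) : Prop := out = tbt_helper_alt start graph visited subtree mod
instance (start : Int) (graph : List (List (Int × Int))) (visited : List Bool) (subtree : List Int) (mod : Int) (out : Int) : Decidable (Spec_tbt_helper start graph visited subtree mod out) := by unfold Spec_tbt_helper; infer_instance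

-- ===== CLAIM (what is proved, stated in full; the proofs are below) =====
def Claim_equal_tbt_helper : Prop := ∀ (start : Int) (graph : List (List (Int × Int))) (visited : List Bool) (subtree : List Int) (mod : Int), Dom_tbt_helper start graph visited subtree mod → Pre_tbt_helper start graph visited subtree mod → Spec_tbt_helper start graph visited subtree mod (tbt_helper start graph visited subtree mod)

-- ===== LEMMAS AND PROOFS =====

-- the inner for-loop of dfsA, named for the proofs (definitionally the foldl in dfsA)
def foldA (g : List (List (Int × Int))) (fuel : Nat) (index : Int)
    (edges : List (Int × Int)) (st : List Bool × List Int × Int × List (Int × Int)) :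
    List Bool × List Int × Int × List (Int × Int) :=
  edges.foldl
    (fun st e =>
      if PySem.List.pyGetD st.1 e.1 true then st
      else
        let r := dfsA g fuel e.1 st
        let t := PySem.List.pyGetD r.2.1 e.1 0
        (r.1, PySem.List.pySetD r.2.1 index (PySem.List.pyGetD r.2.1 index 0 + t),
         r.2.2.1, r.2.2.2 ++ [(e.2, t)]))
    st

theorem dfsA_succ (g : List (List (Int × Int))) (fuel : Nat) (index : Int)
    (v : List Bool) (s : List Int) (sz : Int) (es : List (Int × Int)) :
    dfsA g (fuel+1) index (v, s, sz, es) =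
      foldA g fuel index (PySem.List.pyGetD g index [])
        (PySem.List.pySetD v index true,
         PySem.List.pySetD s index (PySem.List.pyGetD s index 0 + 1),
         sz + 1, es) := rfl

def pvS1 (l : List (Int × Int)) : Int := (l.map (fun e => e.1 * e.2)).sum
def pvS2 (l : List (Int × Int)) : Int := (l.map (fun e => e.1 * e.2 * e.2)).sum
def pvT (sz : Int) (l : List (Int × Int)) : Int := (l.map (fun e => e.1 * e.2 * (sz - e.2))).sum

-- a generic foldl invariant
theorem pv_foldl_inv {α β : Type} (P : α → Prop) (f : α → β → α)
    (h : ∀ a b, P a → P (f a b)) : ∀ (l : List β) (a : α), P a → P (l.foldl f a) := by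
  intro l
  induction l with
  | nil => simpa using fun _ h => h
  | cons x t ih => intro a ha; exact ih _ (h a x ha)

-- length preservation
theorem dfsA_foldA_len (g : List (List (Int × Int))) :
    ∀ (fuel : Nat),
      (∀ (i : Int) st, (dfsA g fuel i st).1.length = st.1.length ∧
                       (dfsA g fuel i st).2.1.length = st.2.1.length) ∧
      (∀ (index : Int) (edges : List (Int × Int)) st,
        (foldA g fuel index edges st).1.length = st.1.length ∧
        (foldA g fuel index edges st).2.1.length = st.2.1.length) := by
  have body : ∀ (fuel : Nat),
      (∀ (i : Int) st, (dfsA g fuel i st).1.length = st.1.length ∧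
                       (dfsA g fuel i st).2.1.length = st.2.1.length) →
      (∀ (index : Int) (edges : List (Int × Int)) st,
        (foldA g fuel index edges st).1.length = st.1.length ∧
        (foldA g fuel index edges st).2.1.length = st.2.1.length) := by
    intro fuel hd index edges st
    unfold foldA
    refine pv_foldl_inv
      (fun x => x.1.length = st.1.length ∧ x.2.1.length = st.2.1.length)
      _ ?_ edges st ⟨rfl, rfl⟩
    intro a e ha
    dsimp only
    split
    · exact ha
    · have := hd e.1 a
      simp [PySem.List.length_pySetD, this.1, this.2, ha.1, ha.2]
  intro fuel
  induction fuel with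
  | zero => exact ⟨fun i st => ⟨rfl, rfl⟩, body 0 (fun i st => ⟨rfl, rfl⟩)⟩
  | succ f ih =>
    have hd : ∀ (i : Int) st, (dfsA g (f+1) i st).1.length = st.1.length ∧
        (dfsA g (f+1) i st).2.1.length = st.2.1.length := by
      intro i st
      obtain ⟨v, s, sz, es⟩ := st
      rw [dfsA_succ]
      have := ih.2 i (PySem.List.pyGetD g i [])
        (PySem.List.pySetD v i true,
         PySem.List.pySetD s i (PySem.List.pyGetD s i 0 + 1), sz + 1, es)
      simpa [PySem.List.length_pySetD] using this
    exact ⟨hd, body (f+1) hd⟩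

-- monotone count of unvisited
theorem pv_cnt_set_le : ∀ (v : List Bool) (k : Nat),
    (v.set k true).count false ≤ v.count false := by
  intro v
  induction v with
  | nil => intro k; simp
  | cons b t ih =>
    intro k
    cases k with
    | zero => cases b <;> simp [List.count_cons]
    | succ k =>
      have := ih k
      simp only [List.set_cons_succ, List.count_cons]
      omega

theorem pv_count_set_le (v : List Bool) (i : Int) :
    (PySem.List.pySetD v i true).count false ≤ v.count false := by
  unfold PySem.List.pySetD PySem.List.pySet?
  cases hk : PySem.List.pyIdx? v.length i with
  | none => simp
  | some k => simpa using pv_cnt_set_le v k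

theorem dfsA_foldA_count (g : List (List (Int × Int))) :
    ∀ (fuel : Nat),
      (∀ (i : Int) st, (dfsA g fuel i st).1.count false ≤ st.1.count false) ∧
      (∀ (index : Int) (edges : List (Int × Int)) st,
        (foldA g fuel index edges st).1.count false ≤ st.1.count false) := by
  have body : ∀ (fuel : Nat),
      (∀ (i : Int) st, (dfsA g fuel i st).1.count false ≤ st.1.count false) →
      (∀ (index : Int) (edges : List (Int × Int)) st,
        (foldA g fuel index edges st).1.count false ≤ st.1.count false) := by
    intro fuel hd index edges st
    unfold foldA
    refine pv_foldl_inv (fun x => x.1.count false ≤ st.1.count false)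
      _ ?_ edges st le_rfl
    intro a e ha
    dsimp only
    split
    · exact ha
    · simpa using le_trans (hd e.1 a) ha
  intro fuel
  induction fuel with
  | zero => exact ⟨fun i st => le_rfl, body 0 (fun i st => le_rfl)⟩
  | succ f ih =>
    have hd : ∀ (i : Int) st, (dfsA g (f+1) i st).1.count false ≤ st.1.count false := by
      intro i st
      obtain ⟨v, s, sz, es⟩ := st
      rw [dfsA_succ]
      exact le_trans (ih.2 i _ _) (pv_count_set_le v i)
    exact ⟨hd, body (f+1) hd⟩

-- the accepted-edge accumulator is only appended to, and the rest of the state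
-- does not depend on it
theorem dfsA_foldA_es (g : List (List (Int × Int))) :
    ∀ (fuel : Nat),
      (∀ (i : Int) v s sz es,
        dfsA g fuel i (v, s, sz, es) =
          ((dfsA g fuel i (v, s, sz, [])).1, (dfsA g fuel i (v, s, sz, [])).2.1,
           (dfsA g fuel i (v, s, sz, [])).2.2.1,
           es ++ (dfsA g fuel i (v, s, sz, [])).2.2.2)) ∧
      (∀ (index : Int) (edges : List (Int × Int)) v s sz es,
        foldA g fuel index edges (v, s, sz, es) =
          ((foldA g fuel index edges (v, s, sz, [])).1,
           (foldA g fuel index edges (v, s, sz, [])).2.1,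
           (foldA g fuel index edges (v, s, sz, [])).2.2.1,
           es ++ (foldA g fuel index edges (v, s, sz, [])).2.2.2)) := by
  have body : ∀ (fuel : Nat),
      (∀ (i : Int) v s sz es,
        dfsA g fuel i (v, s, sz, es) =
          ((dfsA g fuel i (v, s, sz, [])).1, (dfsA g fuel i (v, s, sz, [])).2.1,
           (dfsA g fuel i (v, s, sz, [])).2.2.1,
           es ++ (dfsA g fuel i (v, s, sz, [])).2.2.2)) →
      (∀ (index : Int) (edges : List (Int × Int)) v s sz es,
        foldA g fuel index edges (v, s, sz, es) =
          ((foldA g fuel index edges (v, s, sz, [])).1,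
           (foldA g fuel index edges (v, s, sz, [])).2.1,
           (foldA g fuel index edges (v, s, sz, [])).2.2.1,
           es ++ (foldA g fuel index edges (v, s, sz, [])).2.2.2)) := by
    intro fuel hd index edges
    induction edges with
    | nil => intro v s sz es; simp [foldA]
    | cons e t ih =>
      intro v s sz es
      simp only [foldA, List.foldl_cons] at ih ⊢
      by_cases hb : PySem.List.pyGetD v e.1 true = true
      · simpa [hb] using ih v s sz es
      · simp only [Bool.not_eq_true] at hb
        simp only [hb, Bool.false_eq_true, if_false]
        rw [hd e.1 v s sz es]
        dsimp only
        rw [ih, ih (dfsA g fuel e.1 (v, s, sz, [])).1 _ _ ((dfsA g fuel e.1 (v, s, sz, [])).2.2.2 ++ [(e.2, PySem.List.pyGetD (dfsA g fuel e.1 (v, s, sz, [])).2.1 e.1 0)])]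
        simp
  intro fuel
  induction fuel with
  | zero =>
    refine ⟨fun i v s sz es => by simp [dfsA], ?_⟩
    exact body 0 (fun i v s sz es => by simp [dfsA])
  | succ f ih =>
    have hd : ∀ (i : Int) v s sz es,
        dfsA g (f+1) i (v, s, sz, es) =
          ((dfsA g (f+1) i (v, s, sz, [])).1, (dfsA g (f+1) i (v, s, sz, [])).2.1,
           (dfsA g (f+1) i (v, s, sz, [])).2.2.1,
           es ++ (dfsA g (f+1) i (v, s, sz, [])).2.2.2) := by
      intro i v s sz es
      rw [dfsA_succ, dfsA_succ]
      exact body f ih.1 i _ _ _ _ es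
    exact ⟨hd, body (f+1) hd⟩

-- unfolding equations for the stack machine
theorem runB_nil (g : List (List (Int × Int))) (st : List Bool × List Int × Int × Int × Int) :
    runB g st [] = st := by simp only [runB]

theorem runB_post (g : List (List (Int × Int))) (st : List Bool × List Int × Int × Int × Int)
    (p c w : Int) (rest : List PVItem) :
    runB g st (PVItem.post p c w :: rest) =
      runB g (st.1, PySem.List.pySetD st.2.1 p (PySem.List.pyGetD st.2.1 p 0 + PySem.List.pyGetD st.2.1 c 0),
              st.2.2.1, st.2.2.2.1 + w * PySem.List.pyGetD st.2.1 c 0,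
              st.2.2.2.2 + w * PySem.List.pyGetD st.2.1 c 0 * PySem.List.pyGetD st.2.1 c 0) rest := by
  simp only [runB]

theorem runB_edge_true (g : List (List (Int × Int))) (st : List Bool × List Int × Int × Int × Int)
    (p c w : Int) (rest : List PVItem) (h : PySem.List.pyGet? st.1 c = some true) :
    runB g st (PVItem.edge p c w :: rest) = runB g st rest := by
  simp only [runB]
  split <;> simp_all

theorem runB_edge_false (g : List (List (Int × Int))) (st : List Bool × List Int × Int × Int × Int)
    (p c w : Int) (rest : List PVItem) (h : PySem.List.pyGet? st.1 c = some false) :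
    runB g st (PVItem.edge p c w :: rest) =
      runB g (PySem.List.pySetD st.1 c true,
              PySem.List.pySetD st.2.1 c (PySem.List.pyGetD st.2.1 c 0 + 1),
              st.2.2.1 + 1, st.2.2.2.1, st.2.2.2.2)
           (pvEdgeItems c (PySem.List.pyGetD g c []) ++ PVItem.post p c w :: rest) := by
  simp only [runB]
  split <;> simp_all

-- small facts used by the bridge
theorem pv_S1_append (a b : List (Int × Int)) : pvS1 (a ++ b) = pvS1 a + pvS1 b := by
  simp [pvS1]

theorem pv_S2_append (a b : List (Int × Int)) : pvS2 (a ++ b) = pvS2 a + pvS2 b := by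
  simp [pvS2]

theorem pv_getD_of_get? {α : Type} (xs : List α) (i : Int) (d x : α)
    (h : PySem.List.pyGet? xs i = some x) : PySem.List.pyGetD xs i d = x := by
  unfold PySem.List.pyGetD
  rw [h]; rfl

theorem pv_get?_total (v : List Bool) (i : Int)
    (h1 : -(v.length : Int) ≤ i) (h2 : i < (v.length : Int)) :
    ∃ b, PySem.List.pyGet? v i = some b := by
  cases hb : PySem.List.pyGet? v i with
  | some b => exact ⟨b, rfl⟩
  | none =>
    rw [PySem.List.pyGet?_eq_none_iff] at hb
    exact absurd ⟨h1, h2⟩ hb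

theorem pv_all_true (v : List Bool) (i : Int) (hc : v.count false = 0)
    (h1 : -(v.length : Int) ≤ i) (h2 : i < (v.length : Int)) :
    PySem.List.pyGet? v i = some true := by
  obtain ⟨b, hb⟩ := pv_get?_total v i h1 h2
  cases b with
  | true => exact hb
  | false =>
    have hm := PySem.List.mem_of_pyGet?_eq_some v hb
    rw [List.count_eq_zero] at hc
    exact absurd hm hc

-- the bridge
-- the bridge: the stack machine processing the edge items of `edges` performs
-- exactly A's inner loop, with the two sums tracking the appended edge list
theorem pv_getD_mem_or {α : Type} (xs : List α) (i : Int) (d : α) :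
    PySem.List.pyGetD xs i d ∈ xs ∨ PySem.List.pyGetD xs i d = d := by
  cases h : PySem.List.pyGet? xs i with
  | none => exact Or.inr (PySem.List.pyGetD_of_none xs i d h)
  | some x =>
    rw [pv_getD_of_get? xs i d x h]
    exact Or.inl (PySem.List.mem_of_pyGet?_eq_some xs h)

theorem pv_adj_cond (g : List (List (Int × Int))) (nv : Nat)
    (hg : ∀ adj ∈ g, ∀ e ∈ adj, -(nv : Int) ≤ e.1 ∧ e.1 < (nv : Int)) (c : Int) :
    ∀ x ∈ PySem.List.pyGetD g c [], -(nv : Int) ≤ x.1 ∧ x.1 < (nv : Int) := by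
  intro x hx
  rcases pv_getD_mem_or g c [] with h | h
  · exact hg _ h x hx
  · rw [h] at hx; simp at hx

theorem pv_bridge (g : List (List (Int × Int))) (nv : Nat)
    (hg : ∀ adj ∈ g, ∀ e ∈ adj, -(nv : Int) ≤ e.1 ∧ e.1 < (nv : Int)) :
    ∀ (fuel : Nat) (edges : List (Int × Int)) (p : Int) (v : List Bool) (s : List Int)
      (sz w1 w2 : Int) (K : List PVItem),
      v.length = nv →
      (∀ e ∈ edges, -(nv : Int) ≤ e.1 ∧ e.1 < (nv : Int)) →
      v.count false ≤ fuel →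
      runB g (v, s, sz, w1, w2) (pvEdgeItems p edges ++ K) =
        runB g ((foldA g fuel p edges (v, s, sz, [])).1,
                (foldA g fuel p edges (v, s, sz, [])).2.1,
                (foldA g fuel p edges (v, s, sz, [])).2.2.1,
                w1 + pvS1 (foldA g fuel p edges (v, s, sz, [])).2.2.2,
                w2 + pvS2 (foldA g fuel p edges (v, s, sz, [])).2.2.2) K := by
  intro fuel
  induction fuel with
  | zero =>
    intro edges p
    induction edges with
    | nil =>
      intro v s sz w1 w2 K hv he hc
      simp [pvEdgeItems, foldA, pvS1, pvS2]
    | cons e t ihE =>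
      intro v s sz w1 w2 K hv he hc
      have hcz : v.count false = 0 := Nat.le_zero.mp hc
      have hrange := he e (List.mem_cons_self)
      have htrue : PySem.List.pyGet? v e.1 = some true :=
        pv_all_true v e.1 hcz (by rw [hv]; exact hrange.1) (by rw [hv]; exact hrange.2)
      have hstep : pvEdgeItems p (e :: t) ++ K = PVItem.edge p e.1 e.2 :: (pvEdgeItems p t ++ K) := by
        simp [pvEdgeItems]
      rw [hstep, runB_edge_true g (v, s, sz, w1, w2) p e.1 e.2 _ htrue]
      have hA : foldA g 0 p (e :: t) (v, s, sz, ([] : List (Int × Int))) =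
          foldA g 0 p t (v, s, sz, []) := by
        simp only [foldA, List.foldl_cons]
        rw [pv_getD_of_get? v e.1 true true htrue]
        simp
      rw [hA]
      exact ihE v s sz w1 w2 K hv (fun x hx => he x (List.mem_cons_of_mem e hx)) hc
  | succ f ihF =>
    intro edges p
    induction edges with
    | nil =>
      intro v s sz w1 w2 K hv he hc
      simp [pvEdgeItems, foldA, pvS1, pvS2]
    | cons e t ihE =>
      intro v s sz w1 w2 K hv he hc
      have hrange := he e (List.mem_cons_self)
      have het : ∀ x ∈ t, -(nv : Int) ≤ x.1 ∧ x.1 < (nv : Int) :=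
        fun x hx => he x (List.mem_cons_of_mem e hx)
      obtain ⟨b, hb⟩ := pv_get?_total v e.1 (by rw [hv]; exact hrange.1) (by rw [hv]; exact hrange.2)
      have hstep : pvEdgeItems p (e :: t) ++ K = PVItem.edge p e.1 e.2 :: (pvEdgeItems p t ++ K) := by
        simp [pvEdgeItems]
      rw [hstep]
      cases b with
      | true =>
        rw [runB_edge_true g (v, s, sz, w1, w2) p e.1 e.2 _ hb]
        have hA : foldA g (f+1) p (e :: t) (v, s, sz, ([] : List (Int × Int))) =
            foldA g (f+1) p t (v, s, sz, []) := by
          simp only [foldA, List.foldl_cons]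
          rw [pv_getD_of_get? v e.1 true true hb]
          simp
        rw [hA]
        exact ihE v s sz w1 w2 K hv het hc
      | false =>
        -- the machine enters the child
        rw [runB_edge_false g (v, s, sz, w1, w2) p e.1 e.2 _ hb]
        have hlt := pv_count_set_lt v e.1 hb
        have hrec := ihF (PySem.List.pyGetD g e.1 []) e.1
          (PySem.List.pySetD v e.1 true)
          (PySem.List.pySetD s e.1 (PySem.List.pyGetD s e.1 0 + 1))
          (sz + 1) w1 w2 (PVItem.post p e.1 e.2 :: (pvEdgeItems p t ++ K))
          (by rw [PySem.List.length_pySetD]; exact hv)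
          (pv_adj_cond g nv hg e.1)
          (by omega)
        rw [hrec]
        -- the child's loop is A's recursive call
        rw [← dfsA_succ g f e.1 v s sz []]
        rw [runB_post]
        dsimp only
        -- finish the remaining edges
        have hlen := (dfsA_foldA_len g (f+1)).1 e.1 (v, s, sz, ([] : List (Int × Int)))
        have hcnt := (dfsA_foldA_count g (f+1)).1 e.1 (v, s, sz, ([] : List (Int × Int)))
        have hrest := ihE
          (dfsA g (f+1) e.1 (v, s, sz, [])).1
          (PySem.List.pySetD (dfsA g (f+1) e.1 (v, s, sz, [])).2.1 p
            (PySem.List.pyGetD (dfsA g (f+1) e.1 (v, s, sz, [])).2.1 p 0 +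
             PySem.List.pyGetD (dfsA g (f+1) e.1 (v, s, sz, [])).2.1 e.1 0))
          (dfsA g (f+1) e.1 (v, s, sz, [])).2.2.1
          (w1 + pvS1 (dfsA g (f+1) e.1 (v, s, sz, [])).2.2.2 +
            e.2 * PySem.List.pyGetD (dfsA g (f+1) e.1 (v, s, sz, [])).2.1 e.1 0)
          (w2 + pvS2 (dfsA g (f+1) e.1 (v, s, sz, [])).2.2.2 +
            e.2 * PySem.List.pyGetD (dfsA g (f+1) e.1 (v, s, sz, [])).2.1 e.1 0 *
              PySem.List.pyGetD (dfsA g (f+1) e.1 (v, s, sz, [])).2.1 e.1 0)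
          K
          (by simpa using hlen.1.trans hv)
          het
          (by simp only at hcnt; omega)
        rw [hrest]
        -- A's loop on (e :: t)
        have hA : foldA g (f+1) p (e :: t) (v, s, sz, ([] : List (Int × Int))) =
            foldA g (f+1) p t
              ((dfsA g (f+1) e.1 (v, s, sz, [])).1,
               PySem.List.pySetD (dfsA g (f+1) e.1 (v, s, sz, [])).2.1 p
                 (PySem.List.pyGetD (dfsA g (f+1) e.1 (v, s, sz, [])).2.1 p 0 +
                  PySem.List.pyGetD (dfsA g (f+1) e.1 (v, s, sz, [])).2.1 e.1 0),
               (dfsA g (f+1) e.1 (v, s, sz, [])).2.2.1,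
               (dfsA g (f+1) e.1 (v, s, sz, [])).2.2.2 ++
                 [(e.2, PySem.List.pyGetD (dfsA g (f+1) e.1 (v, s, sz, [])).2.1 e.1 0)]) := by
          simp only [foldA, List.foldl_cons]
          rw [pv_getD_of_get? v e.1 true false hb]
          simp
        rw [hA]
        rw [(dfsA_foldA_es g (f+1)).2 p t _ _ _
          ((dfsA g (f+1) e.1 (v, s, sz, [])).2.2.2 ++
            [(e.2, PySem.List.pyGetD (dfsA g (f+1) e.1 (v, s, sz, [])).2.1 e.1 0)])]
        refine congrArg (fun z => runB g z K) ?_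
        simp only [Prod.mk.injEq, pv_S1_append, pv_S2_append]
        refine ⟨trivial, trivial, trivial, ?_, ?_⟩
        · simp [pvS1]; ring
        · simp [pvS2]; ring

theorem pv_fmod_add (a b m : Int) : PySem.Int.mod (PySem.Int.mod a m + b) m = PySem.Int.mod (a + b) m := by
  show ((a.fmod m) + b).fmod m = (a+b).fmod m
  conv_rhs => rw [← Int.fmod_add_mul_fdiv a m]
  rw [add_right_comm]
  simpa using Int.add_mul_fmod_self (a := a.fmod m + b) (b := a.fdiv m) (c := m)

theorem pv_modfold (m sz : Int) :
    ∀ (l : List (Int × Int)) (a : Int),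
      l.foldl (fun ans e => PySem.Int.mod (ans + e.1 * e.2 * (sz - e.2)) m) (PySem.Int.mod a m) =
        PySem.Int.mod (a + pvT sz l) m := by
  intro l
  induction l with
  | nil => intro a; simp [pvT]
  | cons e t ih =>
    intro a
    simp only [List.foldl_cons, pv_fmod_add]
    rw [ih (a + e.1 * e.2 * (sz - e.2))]
    simp [pvT, add_assoc]

theorem pvT_eq (sz : Int) (l : List (Int × Int)) : pvT sz l = sz * pvS1 l - pvS2 l := by
  induction l with
  | nil => simp [pvT, pvS1, pvS2]
  | cons e t ih => simp [pvT, pvS1, pvS2] at ih ⊢; rw [ih]; ring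

theorem pv_final (m sz : Int) (l : List (Int × Int)) :
    l.foldl (fun ans e => PySem.Int.mod (ans + e.1 * e.2 * (sz - e.2)) m) 0 =
      PySem.Int.mod (sz * (0 + pvS1 l) - (0 + pvS2 l)) m := by
  have h0 : (0 : Int) = PySem.Int.mod 0 m := by simp [PySem.Int.mod]
  conv_lhs => rw [h0]
  rw [pv_modfold m sz l 0]
  rw [pvT_eq]
  simp

-- ===== VERDICT (by name: the statement is the Claim_ definition above) =====
theorem tbt_helper_spec : Claim_equal_tbt_helper := by
  intro start g v s m _hdom hpre
  obtain ⟨hm, hstart, hvr, hgs⟩ := hpre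
  unfold Spec_tbt_helper tbt_helper tbt_helper_alt
  dsimp only
  rw [dfsA_succ]
  have hb := pv_bridge g v.length hvr (v.count false) (PySem.List.pyGetD g start []) start
    (PySem.List.pySetD v start true)
    (PySem.List.pySetD s start (PySem.List.pyGetD s start 0 + 1)) 1 0 0 []
    (PySem.List.length_pySetD v start true)
    (pv_adj_cond g v.length hvr start)
    (pv_count_set_le v start)
  rw [List.append_nil] at hb
  simp only [zero_add]
  rw [hb, runB_nil]
  exact pv_final m _ _
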